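-- pv_equiv track=rewrite | github.com/alexsoll/DNA_MANOVA_analysis | DNA_MANOVA_analysis.py | get_dict_gene_cpg
-- ===== SOURCE A (Python) =====
-- def get_dict_gene_cpg(dict):    #Creating a dictionary, where the key - gene, data - cpg
--     #sorted(dict.items(), key = lambda item: item[1][4])
--     dict_genes_cpg = {}
--     for key in dict:
--         tmp = dict[key][4].split(";")
--         for j in range(len(tmp)):
--             if tmp[j] not in dict_genes_cpg:
--                 dict_genes_cpg[tmp[j]] = key
--             else:
--                 dict_genes_cpg[tmp[j]] += ";" + key
--     return dict_genes_cpg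
-- ===== SOURCE B (Python) =====
-- def get_dict_gene_cpg(dict):    # alternative: flatten to (cpg, gene) pairs, dedup cpgs, then group by scanning the pair list
--     pairs = [(cpg, key) for key in dict for cpg in dict[key][4].split(";")]
--     order = {}.fromkeys(c for c, _ in pairs)
--     return {cpg: ";".join(k for c, k in pairs if c == cpg) for cpg in order}
-- ===== Notes on version B (the rewrite author's own statement) =====
-- stated objective: alternative
-- what changed: B abandons A's incremental string-concatenating dict: it flattens the input into a (cpg, gene) pair list, dedups the cpg column for first-occurrence order, and then builds each output entry by filtering the pair list per cpg and joining the group once.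
import Mathlib
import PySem

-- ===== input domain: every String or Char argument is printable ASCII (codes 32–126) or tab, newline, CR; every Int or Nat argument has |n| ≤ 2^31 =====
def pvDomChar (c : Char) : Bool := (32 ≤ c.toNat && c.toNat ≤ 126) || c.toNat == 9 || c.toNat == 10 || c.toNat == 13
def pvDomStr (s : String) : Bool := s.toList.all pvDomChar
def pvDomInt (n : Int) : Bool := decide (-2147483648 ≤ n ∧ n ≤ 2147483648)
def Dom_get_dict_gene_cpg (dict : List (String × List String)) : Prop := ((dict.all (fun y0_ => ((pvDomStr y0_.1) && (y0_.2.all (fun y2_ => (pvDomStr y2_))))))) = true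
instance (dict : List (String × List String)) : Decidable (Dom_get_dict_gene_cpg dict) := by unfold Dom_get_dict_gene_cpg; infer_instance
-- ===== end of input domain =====

-- B replaces A's incremental string-concatenating dict by three staged passes: flatten the
-- input to a (cpg, gene) pair list, dedup the cpg column, then filter-and-join per cpg
-- (objective: alternative decomposition, not claimed faster).


-- ===== PORT A =====
-- inner loop body of A: 'if tmp[j] not in dict_genes_cpg: … = key else: … += ";" + key'
-- (membership test + lookup fused into the single get? the two branches amount to)
def pvAInner (key : String) (d : PySem.Dict String String) (c : String) : PySem.Dict String String :=
  match d.get? c with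
  | none => d.insert c key
  | some s => d.insert c (s ++ ";" ++ key)

-- one iteration of A's outer loop: tmp = dict[key][4].split(";"); for j in range(len(tmp)): …
def pvAStep (d : PySem.Dict String String) (kv : String × List String) : PySem.Dict String String :=
  match PySem.List.pyGet? kv.2 4 with
  | none => d          -- Python raises IndexError here; excluded by Pre_
  | some v =>
    match PySem.Str.split? v ";" with
    | none => d        -- unreachable: the separator ";" is non-empty
    | some tmp => tmp.foldl (pvAInner kv.1) d

def get_dict_gene_cpg (dict : List (String × List String)) : List (String × String) :=
  (dict.foldl pvAStep PySem.Dict.empty).items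

-- ===== PORT B =====
-- pairs = [(cpg, key) for key in dict for cpg in dict[key][4].split(";")]
def pvPairs (dict : List (String × List String)) : List (String × String) :=
  dict.flatMap (fun kv =>
    match PySem.List.pyGet? kv.2 4 with
    | none => []       -- Python raises IndexError here; excluded by Pre_
    | some v =>
      match PySem.Str.split? v ";" with
      | none => []     -- unreachable: the separator ";" is non-empty
      | some cs => cs.map (fun c => (c, kv.1)))

-- order = {}.fromkeys(c for c, _ in pairs); {cpg: ";".join(k for c, k in pairs if c == cpg) for cpg in order}
def get_dict_gene_cpg_alt (dict : List (String × List String)) : List (String × String) :=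
  let pairs := pvPairs dict
  (PySem.List.dedup (pairs.map Prod.fst)).map
    (fun c => (c, PySem.Str.join ";" ((pairs.filter (fun p => p.1 == c)).map Prod.snd)))

-- ===== PRECONDITION & SPEC =====
-- Pre_ excludes exactly the entries whose value list has fewer than 5 elements:
-- there Python's dict[key][4] raises IndexError (in both A and B).
def Pre_get_dict_gene_cpg (dict : List (String × List String)) : Prop :=
  ∀ p ∈ dict, 5 ≤ p.2.length
instance (dict : List (String × List String)) : Decidable (Pre_get_dict_gene_cpg dict) := by
  unfold Pre_get_dict_gene_cpg; infer_instance

def pvWitness_get_dict_gene_cpg : (List (String × List String)) :=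
  [("g1", ["a", "b", "c", "d", "cg1;cg2"]), ("g2", ["a", "b", "c", "d", "cg2"])]

def Spec_get_dict_gene_cpg (dict : List (String × List String)) (out : List (String × String)) : Prop := out = get_dict_gene_cpg_alt dict
instance (dict : List (String × List String)) (out : List (String × String)) : Decidable (Spec_get_dict_gene_cpg dict out) := by unfold Spec_get_dict_gene_cpg; infer_instance

-- ===== CLAIM (what is proved, stated in full; the proofs are below) =====
def Claim_equal_get_dict_gene_cpg : Prop := ∀ (dict : List (String × List String)), Dom_get_dict_gene_cpg dict → Pre_get_dict_gene_cpg dict → Spec_get_dict_gene_cpg dict (get_dict_gene_cpg dict)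

-- ===== LEMMAS AND PROOFS =====

-- A's inner step viewed as a step over one flattened (cpg, gene) pair
def pvStepP (d : PySem.Dict String String) (p : String × String) : PySem.Dict String String :=
  pvAInner p.2 d p.1

-- group-by of a pair list: B's output shape, parameterised by the processed prefix
def pvG (qs : List (String × String)) : List (String × String) :=
  (PySem.List.dedup (qs.map Prod.fst)).map
    (fun c => (c, PySem.Str.join ";" ((qs.filter (fun p => p.1 == c)).map Prod.snd)))

theorem pvCharsJoinAppend (sep x : List Char) (xs : List (List Char)) (h : xs ≠ []) :
    PySem.Chars.join sep (xs ++ [x]) = PySem.Chars.join sep xs ++ sep ++ x := by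
  induction xs with
  | nil => simp at h
  | cons a t ih =>
    cases t with
    | nil => simp [PySem.Chars.join_singleton, PySem.Chars.join_cons_cons]
    | cons b t' =>
      rw [List.cons_append, List.cons_append, PySem.Chars.join_cons_cons,
          PySem.Chars.join_cons_cons, ← List.cons_append, ih (by simp)]
      simp [List.append_assoc]

theorem pvJoinSingleton (k : String) : PySem.Str.join ";" [k] = k := by
  simp [PySem.Str.join, PySem.Chars.join_singleton]

theorem pvJoinAppend (l : List String) (k : String) (h : l ≠ []) :
    PySem.Str.join ";" (l ++ [k]) = PySem.Str.join ";" l ++ ";" ++ k := by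
  apply String.toList_inj.mp
  have hmap : l.map String.toList ≠ [] := by simpa using h
  simp only [PySem.Str.join, String.toList_ofList, String.toList_append, List.map_append,
    List.map_cons, List.map_nil]
  rw [pvCharsJoinAppend _ _ _ hmap]

-- dedup of an appended element is PySem.Set.add
theorem pvDedupSnoc {α : Type} [BEq α] (xs : List α) (x : α) :
    PySem.List.dedup (xs ++ [x]) = PySem.Set.add (PySem.List.dedup xs) x := by
  simp [PySem.List.dedup, PySem.Set.ofList, List.foldl_append]

theorem pvFindSelf (l : List String) (c : String) (h : c ∈ l) :
    l.find? (fun c' => c' == c) = some c := by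
  induction l with
  | nil => simp at h
  | cons a t ih =>
    by_cases hac : a = c
    · simp [List.find?, hac]
    · have hct : c ∈ t := by
        rcases List.mem_cons.mp h with h1 | h1
        · exact absurd h1.symm hac
        · exact h1
      have hbeq : (a == c) = false := by simp [hac]
      simp [List.find?, hbeq, ih hct]

theorem pvFilterNe (qs : List (String × String)) (c k c' : String) (h : ¬ c' = c) :
    (qs ++ [(c, k)]).filter (fun p => p.1 == c') = qs.filter (fun p => p.1 == c') := by
  have hcc : (c == c') = false := by simp; exact fun hh => h hh.symm
  simp [List.filter_append, hcc]

theorem pvGroupNe (qs : List (String × String)) (c : String) (h : c ∈ qs.map Prod.fst) :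
    qs.filter (fun p => p.1 == c) ≠ [] := by
  rcases List.mem_map.mp h with ⟨p, hp, hpc⟩
  have : p ∈ qs.filter (fun p => p.1 == c) := List.mem_filter.mpr ⟨hp, by simp [hpc]⟩
  intro hnil; rw [hnil] at this; simp at this

-- find? over pvG qs
theorem pvGetG (d : PySem.Dict String String) (qs : List (String × String))
    (h : d.items = pvG qs) (c : String) :
    d.get? c = if c ∈ qs.map Prod.fst
      then some (PySem.Str.join ";" ((qs.filter (fun p => p.1 == c)).map Prod.snd))
      else none := by
  simp only [PySem.Dict.get?, h, pvG, List.find?_map]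
  by_cases hc : c ∈ qs.map Prod.fst
  · have hc' : c ∈ PySem.List.dedup (qs.map Prod.fst) := (PySem.List.mem_dedup _ _).mpr hc
    rw [show ((fun p : String × String => p.1 == c) ∘ _) = (fun c' => c' == c) from rfl,
        pvFindSelf _ _ hc']
    simp [hc]
  · have hc' : c ∉ PySem.List.dedup (qs.map Prod.fst) := fun hh => hc ((PySem.List.mem_dedup _ _).mp hh)
    rw [List.find?_eq_none.mpr (fun x hx => by simp; rintro rfl; exact hc' hx)]
    simp [hc]

-- one pair step preserves the group-by shape
theorem pvStepG (d : PySem.Dict String String) (qs : List (String × String)) (c k : String)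
    (h : d.items = pvG qs) :
    (pvStepP d (c, k)).items = pvG (qs ++ [(c, k)]) := by
  have hget := pvGetG d qs h c
  have hdedup : PySem.List.dedup ((qs ++ [(c, k)]).map Prod.fst)
      = PySem.Set.add (PySem.List.dedup (qs.map Prod.fst)) c := by
    rw [List.map_append]; exact pvDedupSnoc _ _
  by_cases hc : c ∈ qs.map Prod.fst
  · -- existing group: A overwrites, B's group gains k at the end
    have hmem : c ∈ PySem.List.dedup (qs.map Prod.fst) := (PySem.List.mem_dedup _ _).mpr hc
    have hgs : d.get? c = some (PySem.Str.join ";" ((qs.filter (fun p => p.1 == c)).map Prod.snd)) := by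
      rw [hget, if_pos hc]
    have hcd : d.contains c = true := by rw [PySem.Dict.contains_eq_isSome_get?, hgs]; rfl
    have hadd : PySem.Set.add (PySem.List.dedup (qs.map Prod.fst)) c
        = PySem.List.dedup (qs.map Prod.fst) := by
      simp only [PySem.Set.add, PySem.Set.contains]
      rw [if_pos (by simpa using hmem)]
    rw [pvStepP, pvAInner, hgs]
    rw [PySem.Dict.items_insert_of_contains _ _ hcd, h, pvG, pvG, hdedup, hadd, List.map_map]
    apply List.map_congr_left
    intro c' _
    by_cases hcc : c' = c
    · subst hcc
      have hne := pvGroupNe qs c' hc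
      have hnem : (qs.filter (fun p => p.1 == c')).map Prod.snd ≠ [] := by simpa using hne
      simp only [Function.comp_apply, beq_self_eq_true, if_pos]
      rw [List.filter_append]
      simp [pvJoinAppend _ k hnem]
    · simp only [Function.comp_apply]
      rw [if_neg (by simp [hcc]), pvFilterNe qs c k c' hcc]
  · -- new group: A inserts, B's dedup gains c at the end
    have hgs : d.get? c = none := by rw [hget, if_neg hc]
    have hcd : d.contains c = false := by rw [PySem.Dict.contains_eq_isSome_get?, hgs]; rfl
    have hmem : c ∉ PySem.List.dedup (qs.map Prod.fst) := fun hh => hc ((PySem.List.mem_dedup _ _).mp hh)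
    have hadd : PySem.Set.add (PySem.List.dedup (qs.map Prod.fst)) c
        = PySem.List.dedup (qs.map Prod.fst) ++ [c] := by
      simp only [PySem.Set.add, PySem.Set.contains]
      rw [if_neg (by simpa using hmem)]
    rw [pvStepP, pvAInner, hgs]
    rw [PySem.Dict.items_insert_of_not_contains _ _ hcd, h, pvG, pvG, hdedup, hadd, List.map_append]
    congr 1
    · apply List.map_congr_left
      intro c' hc'
      have hcc : ¬ c' = c := fun hh => hmem (hh ▸ hc')
      rw [pvFilterNe qs c k c' hcc]
    · have hfil : qs.filter (fun p => p.1 == c) = [] := by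
        apply List.filter_eq_nil_iff.mpr
        intro p hp
        have hpc : p.1 ≠ c := fun hpc => hc (List.mem_map.mpr ⟨p, hp, hpc⟩)
        simp [hpc]
      simp [List.filter_append, hfil, pvJoinSingleton]

theorem pvFoldG (ps qs : List (String × String)) (d : PySem.Dict String String)
    (h : d.items = pvG qs) : (ps.foldl pvStepP d).items = pvG (qs ++ ps) := by
  induction ps generalizing qs d with
  | nil => simpa using h
  | cons p t ih =>
    obtain ⟨c, k⟩ := p
    have := ih (qs ++ [(c, k)]) (pvStepP d (c, k)) (pvStepG d qs c k h)
    simpa [List.append_assoc] using this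

-- A's nested fold is a fold over the flattened pair list
theorem pvFoldFlatten (dict : List (String × List String)) (d : PySem.Dict String String) :
    dict.foldl pvAStep d = (pvPairs dict).foldl pvStepP d := by
  induction dict generalizing d with
  | nil => rfl
  | cons kv t ih =>
    rw [List.foldl_cons, pvPairs, List.flatMap_cons, List.foldl_append, ih]
    congr 1
    rw [pvAStep]
    cases PySem.List.pyGet? kv.2 4 with
    | none => rfl
    | some v =>
      dsimp only
      cases PySem.Str.split? v ";" with
      | none => rfl
      | some cs => rw [List.foldl_map]; rfl

-- ===== VERDICT (by name: the statement is the Claim_ definition above) =====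
theorem get_dict_gene_cpg_spec : Claim_equal_get_dict_gene_cpg := by
  intro dict _ _
  unfold Spec_get_dict_gene_cpg get_dict_gene_cpg get_dict_gene_cpg_alt
  rw [pvFoldFlatten]
  have h := pvFoldG (pvPairs dict) [] PySem.Dict.empty rfl
  simpa [pvG] using h
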